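-- pv_equiv track=rewrite | github.com/Emaldonador/mutantsProyect | mutantsIdentifier/mutantsIdentifier.py | isMutant
-- ===== SOURCE A (Python) =====
-- def isMutant(adn):
--     n = len(adn)
--     mutant = False
--     secuenceQty = 0
--
--     i = 0
--     while i < n and mutant == False:
--         j=0
--         while j < n and mutant == False:
--             letter = adn[i][j]
--             if j+3 < n and letter == adn[i][j+1] and letter == adn[i][j+2] and letter == adn[i][j+3]:
--                 secuenceQty +=1
--
--             if i+3 < n and letter == adn[i+1][j] and letter == adn[i+2][j] and letter == adn[i+3][j]:
--                 secuenceQty +=1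
--
--             if i+3 < n and j+3 < n and letter == adn[i+1][j+1] and letter == adn[i+2][j+2] and letter == adn[i+3][j+3]:
--                 secuenceQty +=1
--             if secuenceQty > 2:
--                 mutant = True
--             j +=1
--         i += 1
--     return mutant
-- ===== SOURCE B (Python) =====
-- def isMutant(adn):
--     # Run-length scan of the n x n grid's rows, columns and down-right
--     # diagonals, returning as soon as the accumulated total exceeds 2,
--     # instead of per-cell length-4 window checks with an early-exit flag.
--     n = len(adn)
--     grid = [row[:n] for row in adn]
--
--     def count_runs(line):
--         c = 0
--         run = 0
--         prev = None
--         for ch in line: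
--             run = run + 1 if ch == prev else 1
--             prev = ch
--             if run >= 4:
--                 c += 1
--         return c
--
--     total = 0
--     for row in grid:
--         total += count_runs(row)
--         if total > 2:
--             return True
--     for j in range(n):
--         total += count_runs([grid[i][j] for i in range(n)])
--         if total > 2:
--             return True
--     for d in range(2 * n - 1):
--         off = d - (n - 1)
--         total += count_runs([grid[i][i + off] for i in range(n) if 0 <= i + off < n])
--         if total > 2:
--             return True
--     return total > 2
-- ===== Notes on version B (the rewrite author's own statement) =====
-- stated objective: alternative
-- what changed: Replaces A's per-cell length-4 window checks with an early-exit flag by run-length scans: one pass over each row, column and down-right diagonal of the n x n grid, counting every position whose current run reaches length 4, and returning True as soon as the accumulated total exceeds 2.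
-- outside the precondition, e.g. on isMutant(['AAAA', 'ABAA', 'AAAA', 'AAA']): A returns True, B returns True
import Mathlib
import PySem

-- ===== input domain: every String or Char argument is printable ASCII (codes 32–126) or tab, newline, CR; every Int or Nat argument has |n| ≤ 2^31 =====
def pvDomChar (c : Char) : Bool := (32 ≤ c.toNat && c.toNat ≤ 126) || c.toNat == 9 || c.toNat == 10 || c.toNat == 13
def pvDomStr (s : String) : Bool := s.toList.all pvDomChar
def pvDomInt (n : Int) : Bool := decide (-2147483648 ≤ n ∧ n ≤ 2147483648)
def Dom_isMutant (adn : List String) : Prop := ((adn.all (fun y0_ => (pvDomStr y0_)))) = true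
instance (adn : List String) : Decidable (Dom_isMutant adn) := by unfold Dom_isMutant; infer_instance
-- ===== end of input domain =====

-- B replaces A's per-cell length-4 window checks (with early-exit flag) by run-length
-- scans of each row, column and down-right diagonal of the n×n grid (objective: alternative).

-- ===== PORT A =====
-- adn[i][j] for Int indices; the ' '/"" defaults are never reached under Pre_isMutant
def pvCellA (adn : List String) (i j : Int) : Char :=
  match PySem.List.pyGet? adn i with
  | none => ' '
  | some s => (PySem.Str.pyGet? s j).getD ' '

def pvAInner (adn : List String) (n i j c : Int) (mutant : Bool) : Int × Bool :=
  if h : j < n ∧ mutant = false then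
    let letter := pvCellA adn i j
    let c := if j+3 < n ∧ letter = pvCellA adn i (j+1) ∧ letter = pvCellA adn i (j+2) ∧ letter = pvCellA adn i (j+3) then c+1 else c
    let c := if i+3 < n ∧ letter = pvCellA adn (i+1) j ∧ letter = pvCellA adn (i+2) j ∧ letter = pvCellA adn (i+3) j then c+1 else c
    let c := if i+3 < n ∧ j+3 < n ∧ letter = pvCellA adn (i+1) (j+1) ∧ letter = pvCellA adn (i+2) (j+2) ∧ letter = pvCellA adn (i+3) (j+3) then c+1 else c
    let mutant := if c > 2 then true else mutant
    pvAInner adn n i (j+1) c mutant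
  else (c, mutant)
termination_by (n - j).toNat
decreasing_by omega

def pvAOuter (adn : List String) (n i c : Int) (mutant : Bool) : Bool :=
  if h : i < n ∧ mutant = false then
    let r := pvAInner adn n i 0 c mutant
    pvAOuter adn n (i+1) r.1 r.2
  else mutant
termination_by (n - i).toNat
decreasing_by omega

def isMutant (adn : List String) : Bool :=
  pvAOuter adn (adn.length : Int) 0 0 false

-- ===== PORT B =====
def pvCountRuns (line : List Char) : Int :=
  (line.foldl (fun (st : Int × Int × Option Char) ch =>
      let run := if some ch = st.2.2 then st.2.1 + 1 else 1
      let c := if run ≥ 4 then st.1 + 1 else st.1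
      (c, run, some ch)) (0, 0, none)).1

-- grid[i] for an Int index; the [] default is never reached (i ranges over range(n))
def pvGridRow (grid : List (List Char)) (i : Int) : List Char :=
  (PySem.List.pyGet? grid i).getD []

-- grid[i][j]; the ' ' default is never reached under Pre_isMutant
def pvGridAt (grid : List (List Char)) (i j : Int) : Char :=
  (PySem.List.pyGet? (pvGridRow grid i) j).getD ' '

-- loop body 'total += count_runs(line); if total > 2: return True' (none = early return True)
def pvLoop {A : Type} (f : A -> Int) : List A -> Int -> Option Int
  | [], t => some t
  | x :: xs, t =>
      let t' := t + f x
      if t' > 2 then none else pvLoop f xs t'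

def isMutant_alt (adn : List String) : Bool :=
  let n : Int := adn.length
  let grid : List (List Char) := adn.map (fun row => PySem.List.slice row.toList none (some n))  -- row[:n]
  match pvLoop pvCountRuns grid 0 with
  | none => true
  | some t1 =>
    match pvLoop (fun j => pvCountRuns ((PySem.List.pyRange 0 n 1).map (fun i => pvGridAt grid i j)))
        (PySem.List.pyRange 0 n 1) t1 with
    | none => true
    | some t2 =>
      match pvLoop (fun d =>
            let off := d - (n-1)
            pvCountRuns (((PySem.List.pyRange 0 n 1).filter
              (fun i => decide (0 <= i + off) && decide (i + off < n))).map
              (fun i => pvGridAt grid i (i + off))))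
          (PySem.List.pyRange 0 (2*n-1) 1) t2 with
      | none => true
      | some t3 => decide (t3 > 2)

-- ===== PRECONDITION & SPEC =====
-- Pre_ excludes inputs with a row shorter than len(adn): both programs index the full n×n
-- grid and raise IndexError there, unless an early exit (three sequences found before the
-- short row is reached) returns True first — a value-dependent set with no closed form, so
-- Pre_ is slightly narrower than the raising set.
def Pre_isMutant (adn : List String) : Prop := ∀ s ∈ adn, adn.length ≤ s.length
instance (adn : List String) : Decidable (Pre_isMutant adn) := by unfold Pre_isMutant; infer_instance

def pvWitness_isMutant : List String := ["ACGT", "CAGT", "TTAT", "AGAC"]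

def Spec_isMutant (adn : List String) (out : Bool) : Prop := out = isMutant_alt adn
instance (adn : List String) (out : Bool) : Decidable (Spec_isMutant adn out) := by unfold Spec_isMutant; infer_instance

-- ===== CLAIM (what is proved, stated in full; the proofs are below) =====
def Claim_equal_isMutant : Prop := ∀ (adn : List String), Dom_isMutant adn → Pre_isMutant adn → Spec_isMutant adn (isMutant adn)

-- ===== LEMMAS AND PROOFS =====

-- canonical cell access, ℕ indices
def pvG (adn : List String) (i j : ℕ) : Char := ((adn.getD i "").toList).getD j ' '

-- number of length-4 equal windows in a list
def pvW : List Char → Int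
  | a :: b :: c :: d :: t => (if a = b ∧ a = c ∧ a = d then 1 else 0) + pvW (b :: c :: d :: t)
  | _ => 0

-- window indicator along a line given by f, line length m
def pvRowInd (m : ℕ) (f : ℕ → Char) (j : ℕ) : Int :=
  if j+3 < m ∧ f j = f (j+1) ∧ f j = f (j+2) ∧ f j = f (j+3) then 1 else 0

-- diagonal window indicator at cell (i,j)
def pvDInd (adn : List String) (n i j : ℕ) : Int :=
  if i+3 < n ∧ j+3 < n ∧ pvG adn i j = pvG adn (i+1) (j+1) ∧ pvG adn i j = pvG adn (i+2) (j+2) ∧ pvG adn i j = pvG adn (i+3) (j+3) then 1 else 0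

-- per-cell contribution of A's three checks
def pvCA (adn : List String) (n i j : ℕ) : Int :=
  pvRowInd n (fun t => pvG adn i t) j + pvRowInd n (fun t => pvG adn t j) i + pvDInd adn n i j

def pvRowL (adn : List String) (n i : ℕ) : List Char := (List.range n).map (fun j => pvG adn i j)
def pvColL (adn : List String) (n j : ℕ) : List Char := (List.range n).map (fun i => pvG adn i j)
def pvUD (adn : List String) (n o : ℕ) : List Char := (List.range (n - o)).map (fun t => pvG adn t (t + o))
def pvLD (adn : List String) (n o : ℕ) : List Char := (List.range (n - o)).map (fun t => pvG adn (t + o) t)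

def pvTotal (adn : List String) (n : ℕ) : Int :=
  (∑ i ∈ Finset.range n, pvW (pvRowL adn n i)) + (∑ j ∈ Finset.range n, pvW (pvColL adn n j))
  + ((∑ o ∈ Finset.range n, pvW (pvUD adn n o)) + (∑ o ∈ Finset.range (n-1), pvW (pvLD adn n (o+1))))

lemma pvCellA_nat (adn : List String) (i j : ℕ) : pvCellA adn i j = pvG adn i j := by
  unfold pvCellA pvG
  rw [PySem.List.pyGet?_natCast]
  cases h : adn[i]? with
  | none =>
      have : adn.length ≤ i := by simpa using List.getElem?_eq_none_iff.mp h
      rw [List.getD_eq_default _ _ this]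
      simp [String.toList]
  | some s =>
      have : adn.getD i "" = s := by simp [List.getD, h]
      rw [this]
      simp only [PySem.Str.pyGet?_natCast]
      simp [List.getD]

lemma pvCA_nonneg (adn : List String) (n i j : ℕ) : 0 ≤ pvCA adn n i j := by
  unfold pvCA pvRowInd pvDInd
  split_ifs <;> simp

lemma innerA (adn : List String) (nN iN : ℕ) (fuel : ℕ) : ∀ (jN : ℕ), nN - jN ≤ fuel → ∀ (c : Int) (m : Bool), m = decide (c > 2) →
    (pvAInner adn nN iN jN c m).2 = decide (c + ∑ k ∈ Finset.Ico jN nN, pvCA adn nN iN k > 2) ∧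
    (pvAInner adn nN iN jN c m).2 = decide ((pvAInner adn nN iN jN c m).1 > 2) ∧
    ((pvAInner adn nN iN jN c m).1 = c + ∑ k ∈ Finset.Ico jN nN, pvCA adn nN iN k ∨ (pvAInner adn nN iN jN c m).1 > 2) := by
  induction fuel with
  | zero =>
      intro jN hf c m hm
      rw [pvAInner, dif_neg (by omega)]
      have he : Finset.Ico jN nN = ∅ := Finset.Ico_eq_empty (by omega)
      rw [he]
      simp [hm]
  | succ fuel ih =>
      intro jN hf c m hm
      by_cases hj : jN < nN
      · cases m with
        | true =>
            have hc : c > 2 := by simpa using hm.symm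
            rw [pvAInner, dif_neg (by simp)]
            have hS : 0 ≤ ∑ k ∈ Finset.Ico jN nN, pvCA adn nN iN k :=
              Finset.sum_nonneg (fun k _ => pvCA_nonneg adn nN iN k)
            refine ⟨by simp; omega, by simp; omega, Or.inr (by simpa using hc)⟩
        | false =>
            have hc : ¬ (c > 2) := by simpa using hm.symm
            have hstep : pvAInner adn ↑nN ↑iN ↑jN c false
                = pvAInner adn ↑nN ↑iN ↑(jN+1) (c + pvCA adn nN iN jN) (decide (c + pvCA adn nN iN jN > 2)) := by
              rw [pvAInner, dif_pos ⟨by exact_mod_cast hj, rfl⟩]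
              simp only [show ((jN:ℤ)+1) = ((jN+1:ℕ):ℤ) from by push_cast; ring,
                show ((jN:ℤ)+2) = ((jN+2:ℕ):ℤ) from by push_cast; ring,
                show ((jN:ℤ)+3) = ((jN+3:ℕ):ℤ) from by push_cast; ring,
                show ((iN:ℤ)+1) = ((iN+1:ℕ):ℤ) from by push_cast; ring,
                show ((iN:ℤ)+2) = ((iN+2:ℕ):ℤ) from by push_cast; ring,
                show ((iN:ℤ)+3) = ((iN+3:ℕ):ℤ) from by push_cast; ring,
                pvCellA_nat, Nat.cast_lt]
              unfold pvCA pvRowInd pvDInd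
              split_ifs <;> congr 1 <;>
                first
                  | omega
                  | (rw [eq_comm, decide_eq_true_eq]; omega)
                  | (rw [eq_comm, decide_eq_false_iff_not]; omega)
            rw [hstep]
            have hrec := ih (jN+1) (by omega) (c + pvCA adn nN iN jN) _ rfl
            have hsplit : ∑ k ∈ Finset.Ico jN nN, pvCA adn nN iN k
                = pvCA adn nN iN jN + ∑ k ∈ Finset.Ico (jN+1) nN, pvCA adn nN iN k :=
              Finset.sum_eq_sum_Ico_succ_bot hj _
            rw [hsplit]
            obtain ⟨h1, h2, h3⟩ := hrec
            refine ⟨by rw [h1]; congr 1; simp; constructor <;> intro <;> omega, h2, ?_⟩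
            rcases h3 with h3 | h3
            · exact Or.inl (by rw [h3]; ring)
            · exact Or.inr h3
      · rw [pvAInner, dif_neg (by omega)]
        have he : Finset.Ico jN nN = ∅ := Finset.Ico_eq_empty (by omega)
        rw [he]
        simp [hm]


lemma outerA (adn : List String) (nN : ℕ) (fuel : ℕ) : ∀ (iN : ℕ), nN - iN ≤ fuel → ∀ (c : Int) (m : Bool), m = decide (c > 2) →
    pvAOuter adn nN iN c m = decide (c + ∑ i ∈ Finset.Ico iN nN, ∑ j ∈ Finset.range nN, pvCA adn nN i j > 2) := by
  induction fuel with
  | zero =>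
      intro iN hf c m hm
      rw [pvAOuter, dif_neg (by omega)]
      rw [Finset.Ico_eq_empty (by omega)]
      simp [hm]
  | succ fuel ih =>
      intro iN hf c m hm
      by_cases hi : iN < nN
      · cases m with
        | true =>
            have hc : c > 2 := by simpa using hm.symm
            rw [pvAOuter, dif_neg (by simp)]
            have hS : 0 ≤ ∑ i ∈ Finset.Ico iN nN, ∑ j ∈ Finset.range nN, pvCA adn nN i j :=
              Finset.sum_nonneg (fun i _ => Finset.sum_nonneg (fun j _ => pvCA_nonneg adn nN i j))
            rw [eq_comm, decide_eq_true_eq]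
            omega
        | false =>
            rw [pvAOuter, dif_pos ⟨by exact_mod_cast hi, rfl⟩]
            have hinner := innerA adn nN iN nN 0 (by omega) c false hm
            rw [Nat.cast_zero] at hinner
            obtain ⟨h1, h2, h3⟩ := hinner
            have hrec := ih (iN+1) (by omega) _ _ h2
            rw [show ((iN:ℤ)+1) = ((iN+1:ℕ):ℤ) from by push_cast; ring, hrec]
            have hsplit : ∑ i ∈ Finset.Ico iN nN, ∑ j ∈ Finset.range nN, pvCA adn nN i j
                = (∑ j ∈ Finset.range nN, pvCA adn nN iN j)
                  + ∑ i ∈ Finset.Ico (iN+1) nN, ∑ j ∈ Finset.range nN, pvCA adn nN i j :=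
              Finset.sum_eq_sum_Ico_succ_bot hi _
            rw [hsplit]
            have hico : Finset.Ico 0 nN = Finset.range nN := by
              rw [Finset.range_eq_Ico]
            rw [hico] at h1 h3
            have hS' : 0 ≤ ∑ i ∈ Finset.Ico (iN+1) nN, ∑ j ∈ Finset.range nN, pvCA adn nN i j :=
              Finset.sum_nonneg (fun i _ => Finset.sum_nonneg (fun j _ => pvCA_nonneg adn nN i j))
            rw [decide_eq_decide]
            rcases h3 with h3 | h3
            · omega
            · have := h2.symm.trans h1
              rw [decide_eq_decide] at this
              omega
      · rw [pvAOuter, dif_neg (by omega)]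
        rw [Finset.Ico_eq_empty (by omega)]
        simp [hm]

lemma A_eq (adn : List String) :
    isMutant adn = decide ((∑ i ∈ Finset.range adn.length, ∑ j ∈ Finset.range adn.length, pvCA adn adn.length i j) > 2) := by
  unfold isMutant
  have h := outerA adn adn.length adn.length 0 (by omega) 0 false (by decide)
  rw [Nat.cast_zero] at h
  rw [h, Finset.range_eq_Ico]
  norm_num

-- run-length recursion underlying pvCountRuns
def pvRC (run : Int) (prev : Option Char) : List Char → Int
  | [] => 0
  | ch :: t =>
      (if (if some ch = prev then run+1 else 1) ≥ 4 then (1:Int) else 0) +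
      pvRC (if some ch = prev then run+1 else 1) (some ch) t

lemma pvFold_rc (l : List Char) : ∀ (c run : Int) (prev : Option Char),
    (l.foldl (fun (st : Int × Int × Option Char) ch =>
      let run := if some ch = st.2.2 then st.2.1 + 1 else 1
      let c := if run ≥ 4 then st.1 + 1 else st.1
      (c, run, some ch)) (c, run, prev)).1 = c + pvRC run prev l := by
  induction l with
  | nil => intro c run prev; simp [pvRC]
  | cons ch t ih =>
      intro c run prev
      simp only [List.foldl_cons, pvRC]
      rw [ih]
      split_ifs <;> ring

lemma pvW_cons (p : Char) (l : List Char) :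
    pvW (p :: l) = (if 3 ≤ l.length ∧ p = l.getD 0 ' ' ∧ p = l.getD 1 ' ' ∧ p = l.getD 2 ' ' then 1 else 0) + pvW l := by
  match l with
  | [] => simp [pvW]
  | [a] => simp [pvW]
  | [a, b] => simp [pvW]
  | a :: b :: c :: t => simp [pvW, List.getD]

lemma pvW_short (l : List Char) (h : l.length ≤ 3) : pvW l = 0 := by
  rcases l with _|⟨a,_|⟨b,_|⟨c,_|⟨d,t⟩⟩⟩⟩
  · simp [pvW]
  · simp [pvW]
  · simp [pvW]
  · simp [pvW]
  · simp at h; omega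

lemma pvW_boundary (p ch : Char) (t : List Char) (m : ℕ) (hm : m ≤ 3) (hc : ¬ ch = p) :
    pvW (List.replicate m p ++ ch :: t) = pvW (ch :: t) := by
  have hne : ¬ p = ch := fun h => hc h.symm
  interval_cases m
  · simp
  · simp [pvW_cons, List.replicate, hne]
  · simp [pvW_cons, List.replicate, hne]
  · simp [pvW_cons, List.replicate, hne]

lemma pvRC_eq_W (l : List Char) : ∀ (run : Int) (p : Char), 0 ≤ run →
    pvRC run (some p) l = pvW (List.replicate (min run.toNat 3) p ++ l) := by
  induction l with
  | nil =>
      intro run p _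
      rw [pvRC, pvW_short]
      simp
  | cons ch t ih =>
      intro run p hrun
      rw [pvRC]
      by_cases hc : ch = p
      · subst hc
        simp only [if_true]
        rw [ih _ _ (by omega)]
        rcases Nat.lt_or_ge run.toNat 3 with hk | hk
        · have h4 : ¬ (run + 1 ≥ 4) := by omega
          have e1 : min (run+1).toNat 3 = run.toNat + 1 := by omega
          have e2 : min run.toNat 3 = run.toNat := by omega
          rw [if_neg h4, e1, e2, List.replicate_succ', List.append_assoc]
          simp
        · have h4 : run + 1 ≥ 4 := by omega
          have e1 : min (run+1).toNat 3 = 3 := by omega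
          have e2 : min run.toNat 3 = 3 := by omega
          rw [if_pos h4, e1, e2]
          simp [List.replicate_succ, pvW]
      · simp only [if_neg (by simpa using hc : ¬ (some ch = some p))]
        rw [ih _ _ (by omega)]
        have h4 : ¬ ((1:Int) ≥ 4) := by omega
        rw [if_neg h4]
        have e1 : min (1:Int).toNat 3 = 1 := by omega
        rw [e1, pvW_boundary p ch t (min run.toNat 3) (by omega) hc]
        simp

lemma pvCountRuns_eq_W (l : List Char) : pvCountRuns l = pvW l := by
  unfold pvCountRuns
  rw [pvFold_rc]
  cases l with
  | nil => simp [pvRC, pvW]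
  | cons ch t =>
      rw [pvRC]
      have hno : (some ch = none : Prop) = False := by simp
      simp only [hno, if_false]
      have := pvRC_eq_W t 1 ch (by omega)
      have e1 : min (1:Int).toNat 3 = 1 := by omega
      rw [e1] at this
      rw [this]
      norm_num [List.replicate_one]

lemma pvW_map_range (m : ℕ) (f : ℕ → Char) :
    pvW ((List.range m).map f) = ∑ j ∈ Finset.range m, pvRowInd m f j := by
  induction m generalizing f with
  | zero => simp [pvW]
  | succ m ih =>
      rw [List.range_succ_eq_map, List.map_cons, List.map_map, pvW_cons,
        ih (f ∘ Nat.succ), Finset.sum_range_succ']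
      have h2 : ∀ j, pvRowInd (m+1) f (j+1) = pvRowInd m (f ∘ Nat.succ) j := by
        intro j
        unfold pvRowInd
        apply if_congr _ rfl rfl
        constructor <;> rintro ⟨h1, h2⟩ <;> exact ⟨by omega, h2⟩
      have h1 : (if 3 ≤ ((List.range m).map (f ∘ Nat.succ)).length ∧
            f 0 = ((List.range m).map (f ∘ Nat.succ)).getD 0 ' ' ∧
            f 0 = ((List.range m).map (f ∘ Nat.succ)).getD 1 ' ' ∧
            f 0 = ((List.range m).map (f ∘ Nat.succ)).getD 2 ' ' then (1:Int) else 0)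
          = pvRowInd (m+1) f 0 := by
        by_cases h3 : 3 ≤ m
        · have g0 := PySem.List.getD_map_range (f ∘ Nat.succ) m 0 ' ' (by omega)
          have g1 := PySem.List.getD_map_range (f ∘ Nat.succ) m 1 ' ' (by omega)
          have g2 := PySem.List.getD_map_range (f ∘ Nat.succ) m 2 ' ' (by omega)
          rw [g0, g1, g2]
          unfold pvRowInd
          apply if_congr _ rfl rfl
          simp only [List.length_map, List.length_range, Function.comp]
          constructor <;> rintro ⟨_, h2⟩ <;> exact ⟨by omega, h2⟩
        · rw [if_neg, pvRowInd, if_neg]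
          · omega
          · simp only [List.length_map, List.length_range]
            omega
      rw [h1, add_comm]
      congr 1
      exact Finset.sum_congr rfl (fun j _ => (h2 j).symm)

lemma pvFilter_lt_range (n m : ℕ) :
    (List.range n).filter (fun i => decide (i < m)) = List.range (min m n) := by
  induction n with
  | zero => simp
  | succ n ih =>
      rw [List.range_succ, List.filter_append, ih]
      by_cases h : n < m
      · have h1 : min m (n+1) = min m n + 1 := by omega
        rw [h1, List.range_succ]
        simp [h]
        omega
      · have h1 : min m (n+1) = min m n := by omega
        simp [h, h1]

lemma pvFilter_le_range (n m : ℕ) :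
    (List.range n).filter (fun i => decide (m ≤ i)) = (List.range (n - m)).map (· + m) := by
  induction n with
  | zero => simp
  | succ n ih =>
      rw [List.range_succ, List.filter_append, ih]
      by_cases h : m ≤ n
      · have h1 : n + 1 - m = (n - m) + 1 := by omega
        rw [h1, List.range_succ]
        simp [h]
      · have h1 : n + 1 - m = n - m := by omega
        simp [h, h1]

lemma pvTriangle (n : ℕ) (h : ℕ → ℕ → Int) :
    ∑ i ∈ Finset.range n, ∑ o ∈ Finset.range (n - i), h i o
      = ∑ o ∈ Finset.range n, ∑ i ∈ Finset.range (n - o), h i o := by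
  rw [Finset.sum_sigma', Finset.sum_sigma']
  refine Finset.sum_nbij' (fun p => ⟨p.2, p.1⟩) (fun p => ⟨p.2, p.1⟩) ?_ ?_ ?_ ?_ ?_ <;>
    simp only [Finset.mem_sigma, Finset.mem_range] <;> intros <;> first | trivial | omega

lemma pvTriangleStrict (n : ℕ) (h : ℕ → ℕ → Int) :
    ∑ i ∈ Finset.range n, ∑ j ∈ Finset.range i, h i j
      = ∑ j ∈ Finset.range n, ∑ i ∈ Finset.Ico (j+1) n, h i j := by
  rw [Finset.sum_sigma', Finset.sum_sigma']
  refine Finset.sum_nbij' (fun p => ⟨p.2, p.1⟩) (fun p => ⟨p.2, p.1⟩) ?_ ?_ ?_ ?_ ?_ <;>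
    simp only [Finset.mem_sigma, Finset.mem_range, Finset.mem_Ico] <;> intros <;> first | trivial | omega

lemma pvDInd_upper (adn : List String) (n i o : ℕ) :
    pvDInd adn n i (i+o) = pvRowInd (n-o) (fun t => pvG adn t (t+o)) i := by
  unfold pvDInd pvRowInd
  apply if_congr _ rfl rfl
  have b1 : (i+1)+o = i+o+1 := by omega
  have b2 : (i+2)+o = i+o+2 := by omega
  have b3 : (i+3)+o = i+o+3 := by omega
  constructor
  · rintro ⟨h1, h2, e1, e2, e3⟩
    refine ⟨by omega, ?_, ?_, ?_⟩
    · show pvG adn i (i+o) = pvG adn (i+1) ((i+1)+o)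
      rw [b1]; exact e1
    · show pvG adn i (i+o) = pvG adn (i+2) ((i+2)+o)
      rw [b2]; exact e2
    · show pvG adn i (i+o) = pvG adn (i+3) ((i+3)+o)
      rw [b3]; exact e3
  · rintro ⟨h1, e1, e2, e3⟩
    have e1' : pvG adn i (i+o) = pvG adn (i+1) ((i+1)+o) := e1
    have e2' : pvG adn i (i+o) = pvG adn (i+2) ((i+2)+o) := e2
    have e3' : pvG adn i (i+o) = pvG adn (i+3) ((i+3)+o) := e3
    rw [b1] at e1'; rw [b2] at e2'; rw [b3] at e3'
    exact ⟨by omega, by omega, e1', e2', e3'⟩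

lemma pvDInd_lower (adn : List String) (m k j : ℕ) :
    pvDInd adn (m+1) (j+1+k) j = pvRowInd (m-k) (fun t => pvG adn (t+(k+1)) t) j := by
  unfold pvDInd pvRowInd
  apply if_congr _ rfl rfl
  have b0 : j+(k+1) = j+1+k := by omega
  have b1 : (j+1)+(k+1) = j+1+k+1 := by omega
  have b2 : (j+2)+(k+1) = j+1+k+2 := by omega
  have b3 : (j+3)+(k+1) = j+1+k+3 := by omega
  constructor
  · rintro ⟨h1, h2, e1, e2, e3⟩
    refine ⟨by omega, ?_, ?_, ?_⟩
    · show pvG adn (j+(k+1)) j = pvG adn ((j+1)+(k+1)) (j+1)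
      rw [b0, b1]; exact e1
    · show pvG adn (j+(k+1)) j = pvG adn ((j+2)+(k+1)) (j+2)
      rw [b0, b2]; exact e2
    · show pvG adn (j+(k+1)) j = pvG adn ((j+3)+(k+1)) (j+3)
      rw [b0, b3]; exact e3
  · rintro ⟨h1, e1, e2, e3⟩
    have e1' : pvG adn (j+(k+1)) j = pvG adn ((j+1)+(k+1)) (j+1) := e1
    have e2' : pvG adn (j+(k+1)) j = pvG adn ((j+2)+(k+1)) (j+2) := e2
    have e3' : pvG adn (j+(k+1)) j = pvG adn ((j+3)+(k+1)) (j+3) := e3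
    rw [b0, b1] at e1'; rw [b0, b2] at e2'; rw [b0, b3] at e3'
    exact ⟨by omega, by omega, e1', e2', e3'⟩

lemma pvSum_map_getD {α : Type} (l : List α) (h : α → Int) (d : α) :
    (l.map h).sum = ∑ i ∈ Finset.range l.length, h (l.getD i d) := by
  induction l with
  | nil => simp
  | cons x t ih =>
      simp only [List.map_cons, List.sum_cons, List.length_cons, ih]
      rw [Finset.sum_range_succ']
      simp only [List.getD_cons_succ, List.getD_cons_zero]
      rw [add_comm]

lemma pvCA_regroup (adn : List String) (n : ℕ) :
    (∑ i ∈ Finset.range n, ∑ j ∈ Finset.range n, pvCA adn n i j) = pvTotal adn n := by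
  have hR : ∀ i ∈ Finset.range n, (∑ j ∈ Finset.range n, pvRowInd n (fun t => pvG adn i t) j) = pvW (pvRowL adn n i) :=
    fun i _ => (pvW_map_range n _).symm
  have hC : (∑ i ∈ Finset.range n, ∑ j ∈ Finset.range n, pvRowInd n (fun t => pvG adn t j) i)
      = ∑ j ∈ Finset.range n, pvW (pvColL adn n j) := by
    rw [Finset.sum_comm]
    exact Finset.sum_congr rfl (fun j _ => (pvW_map_range n _).symm)
  have hD : (∑ i ∈ Finset.range n, ∑ j ∈ Finset.range n, pvDInd adn n i j)
      = (∑ o ∈ Finset.range n, pvW (pvUD adn n o)) + (∑ o ∈ Finset.range (n-1), pvW (pvLD adn n (o+1))) := by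
    have hsplit : ∀ i ∈ Finset.range n, (∑ j ∈ Finset.range n, pvDInd adn n i j)
        = (∑ j ∈ Finset.Ico i n, pvDInd adn n i j) + ∑ j ∈ Finset.range i, pvDInd adn n i j := by
      intro i hi
      rw [Finset.mem_range] at hi
      rw [Finset.range_eq_Ico, ← Finset.sum_Ico_consecutive _ (Nat.zero_le i) (le_of_lt hi), ← Finset.range_eq_Ico, add_comm]
    rw [Finset.sum_congr rfl hsplit, Finset.sum_add_distrib]
    have hU : (∑ i ∈ Finset.range n, ∑ j ∈ Finset.Ico i n, pvDInd adn n i j)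
        = ∑ o ∈ Finset.range n, pvW (pvUD adn n o) := by
      have h1 : ∀ i ∈ Finset.range n, (∑ j ∈ Finset.Ico i n, pvDInd adn n i j)
          = ∑ k ∈ Finset.range (n - i), pvDInd adn n i (i + k) := fun i _ => Finset.sum_Ico_eq_sum_range _ _ _
      rw [Finset.sum_congr rfl h1, pvTriangle n (fun i k => pvDInd adn n i (i + k))]
      refine Finset.sum_congr rfl (fun o _ => ?_)
      rw [Finset.sum_congr rfl (fun i _ => pvDInd_upper adn n i o), ← pvW_map_range]
      rfl
    have hL : (∑ i ∈ Finset.range n, ∑ j ∈ Finset.range i, pvDInd adn n i j)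
        = ∑ o ∈ Finset.range (n-1), pvW (pvLD adn n (o+1)) := by
      rcases n with _ | m
      · simp
      rw [pvTriangleStrict]
      have h1 : ∀ j ∈ Finset.range (m+1), (∑ i ∈ Finset.Ico (j+1) (m+1), pvDInd adn (m+1) i j)
          = ∑ k ∈ Finset.range (m - j), pvDInd adn (m+1) (j+1+k) j := by
        intro j _
        rw [Finset.sum_Ico_eq_sum_range, show m+1-(j+1) = m - j from by omega]
      rw [Finset.sum_congr rfl h1, Finset.sum_range_succ, show m - m = 0 from by omega]
      simp only [Finset.range_zero, Finset.sum_empty, add_zero]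
      rw [pvTriangle m (fun j k => pvDInd adn (m+1) (j+1+k) j)]
      refine Finset.sum_congr (by rw [show m+1-1 = m from by omega]) (fun k _ => ?_)
      rw [Finset.sum_congr rfl (fun j _ => pvDInd_lower adn m k j), ← pvW_map_range]
      unfold pvLD
      rw [show m+1-(k+1) = m - k from by omega]
    rw [hU, hL]
  unfold pvCA pvTotal
  simp only [Finset.sum_add_distrib]
  rw [Finset.sum_congr rfl hR, hC, hD]

lemma pvSum_range (n : ℕ) (f : ℕ → Int) :
    ((List.range n).map f).sum = ∑ i ∈ Finset.range n, f i := by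
  induction n with
  | zero => simp
  | succ n ih =>
      rw [List.range_succ, List.map_append, List.sum_append, Finset.sum_range_succ, ih]
      simp

lemma pvGridRow_nat (grid : List (List Char)) (i : ℕ) :
    pvGridRow grid ↑i = grid.getD i [] := by
  unfold pvGridRow
  rw [PySem.List.pyGet?_natCast]
  cases h : grid[i]? with
  | none =>
      have : grid.length ≤ i := by simpa using List.getElem?_eq_none_iff.mp h
      rw [List.getD_eq_default _ _ this]
      simp
  | some r => simp [List.getD, h]

lemma pvGridAt_nat (grid : List (List Char)) (i j : ℕ) :
    pvGridAt grid ↑i ↑j = (grid.getD i []).getD j ' ' := by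
  unfold pvGridAt
  rw [pvGridRow_nat]
  rw [PySem.List.pyGet?_natCast]
  simp [List.getD]

lemma pvTake_eq (l : List Char) (n : ℕ) (h : n ≤ l.length) :
    l.take n = (List.range n).map (fun j => l.getD j ' ') := by
  apply List.ext_getElem
  · simp
    omega
  · intro k h1 h2
    have hk : k < l.length := by simp at h1; omega
    simp only [List.getElem_take, List.getElem_map, List.getElem_range]
    rw [List.getD_eq_getElem _ _ hk]

lemma pvRow_len (adn : List String) (pre : Pre_isMutant adn) (i : ℕ) (hi : i < adn.length) :
    adn.length ≤ (adn.getD i "").toList.length := by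
  have hmem : adn.getD i "" ∈ adn := by
    rw [List.getD_eq_getElem _ _ hi]
    exact List.getElem_mem _
  have := pre _ hmem
  rw [String.length_toList]
  exact this

lemma pvGrid_G (adn : List String) (pre : Pre_isMutant adn) (i : ℕ) (hi : i < adn.length) :
    (adn.map (fun row => row.toList.take adn.length)).getD i []
      = (List.range adn.length).map (fun t => pvG adn i t) := by
  have hrow : (adn.map (fun row => row.toList.take adn.length)).getD i []
      = (adn.getD i "").toList.take adn.length := by
    rw [List.getD_eq_getElem _ _ (by simpa using hi), List.getD_eq_getElem _ _ hi, List.getElem_map]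
  rw [hrow, pvTake_eq _ _ (pvRow_len adn pre i hi)]
  rfl

lemma pvGridAt_G (adn : List String) (pre : Pre_isMutant adn) (i j : ℕ)
    (hi : i < adn.length) (hj : j < adn.length) :
    pvGridAt (adn.map (fun row => row.toList.take adn.length)) ↑i ↑j = pvG adn i j := by
  rw [pvGridAt_nat, pvGrid_G adn pre i hi, PySem.List.getD_map_range _ _ _ _ hj]

lemma pvDiagSplit (adn : List String) (n : ℕ) (hn : 1 ≤ n) :
    (∑ d ∈ Finset.range (2*n-1), pvW (if n ≤ d+1 then pvUD adn n (d+1-n) else pvLD adn n (n-1-d)))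
    = (∑ o ∈ Finset.range n, pvW (pvUD adn n o)) + (∑ o ∈ Finset.range (n-1), pvW (pvLD adn n (o+1))) := by
  rw [Finset.range_eq_Ico,
    ← Finset.sum_Ico_consecutive _ (Nat.zero_le (n-1)) (show n-1 ≤ 2*n-1 from by omega),
    ← Finset.range_eq_Ico, add_comm]
  congr 1
  · rw [Finset.sum_Ico_eq_sum_range, show 2*n-1-(n-1) = n from by omega]
    refine Finset.sum_congr rfl (fun k hk => ?_)
    rw [if_pos (by omega), show n-1+k+1-n = k from by omega]
  · rw [← Finset.sum_range_reflect (fun o => pvW (pvLD adn n (o+1))) (n-1)]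
    refine Finset.sum_congr rfl (fun d hd => ?_)
    rw [Finset.mem_range] at hd
    rw [if_neg (by omega), show n-1-1-d+1 = n-1-d from by omega]

lemma pvW_nonneg (l : List Char) : 0 ≤ pvW l := by
  induction l with
  | nil => simp [pvW]
  | cons a t ih =>
      rw [pvW_cons]
      split_ifs <;> omega

lemma pvCountRuns_nonneg (l : List Char) : 0 ≤ pvCountRuns l := by
  rw [pvCountRuns_eq_W]; exact pvW_nonneg l

lemma pvLoop_spec {A : Type} (f : A → Int) (h : ∀ x, 0 ≤ f x) : ∀ (xs : List A) (t : Int), t ≤ 2 →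
    pvLoop f xs t = if t + (xs.map f).sum > 2 then none else some (t + (xs.map f).sum) := by
  intro xs
  induction xs with
  | nil =>
      intro t ht
      rw [pvLoop]
      simp only [List.map_nil, List.sum_nil]
      rw [if_neg (by omega), add_zero]
  | cons x xs ih =>
      intro t ht
      rw [pvLoop]
      simp only [List.map_cons, List.sum_cons]
      have hrest : 0 ≤ (xs.map f).sum := List.sum_nonneg (by
        rintro y hy; obtain ⟨z, _, rfl⟩ := List.mem_map.mp hy; exact h z)
      by_cases hc : t + f x > 2
      · rw [if_pos hc, if_pos (by omega)]
      · rw [if_neg hc, ih _ (by omega),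
          show t + f x + (xs.map f).sum = t + (f x + (xs.map f).sum) from by ring]

lemma B_sums (adn : List String) (pre : Pre_isMutant adn) (hn1 : 1 ≤ adn.length) :
    ((adn.map (fun row => PySem.List.slice row.toList none (some (adn.length : Int)))).map pvCountRuns).sum
    + ((PySem.List.pyRange 0 (adn.length : Int) 1).map (fun j => pvCountRuns
        ((PySem.List.pyRange 0 (adn.length : Int) 1).map
          (fun i => pvGridAt (adn.map (fun row => PySem.List.slice row.toList none (some (adn.length : Int)))) i j)))).sum
    + ((PySem.List.pyRange 0 (2*(adn.length : Int)-1) 1).map (fun d =>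
        pvCountRuns (((PySem.List.pyRange 0 (adn.length : Int) 1).filter
          (fun i => decide (0 ≤ i + (d - ((adn.length : Int)-1))) && decide (i + (d - ((adn.length : Int)-1)) < (adn.length : Int)))).map
          (fun i => pvGridAt (adn.map (fun row => PySem.List.slice row.toList none (some (adn.length : Int)))) i (i + (d - ((adn.length : Int)-1))))))).sum
    = pvTotal adn adn.length := by
  simp only [PySem.List.slice_to_natCast, PySem.List.pyRange_zero_natCast, List.map_map]
  have hpr : PySem.List.pyRange 0 (2 * (adn.length:ℤ) - 1) = List.map (fun k : ℕ => (↑k : ℤ)) (List.range (2*adn.length-1)) := by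
    rw [show 2*(adn.length:ℤ)-1 = ((2*adn.length-1 : ℕ):ℤ) from by omega, PySem.List.pyRange_zero_natCast]
  rw [pvSum_map_getD adn _ "", hpr, List.map_map, pvSum_range, pvSum_range]
  simp only [Function.comp_def]
  have h1 : ∀ i ∈ Finset.range adn.length,
      pvCountRuns (List.take adn.length (adn.getD i "").toList) = pvW (pvRowL adn adn.length i) := by
    intro i hi
    rw [Finset.mem_range] at hi
    rw [pvTake_eq _ _ (pvRow_len adn pre i hi), pvCountRuns_eq_W]
    rfl
  have h2 : ∀ j ∈ Finset.range adn.length,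
      pvCountRuns (List.map
          (fun i : ℕ => pvGridAt (List.map (fun row => List.take adn.length row.toList) adn) ↑i ↑j)
          (List.range adn.length))
        = pvW (pvColL adn adn.length j) := by
    intro j hj
    rw [Finset.mem_range] at hj
    rw [List.map_congr_left (fun i hi =>
      pvGridAt_G adn pre i j (by simpa using hi) hj), pvCountRuns_eq_W]
    rfl
  have h3 : ∀ d ∈ Finset.range (2*adn.length-1),
      pvCountRuns (List.map
          (fun i : ℤ => pvGridAt (List.map (fun row => List.take adn.length row.toList) adn) i (i + (↑d - ((adn.length:ℤ) - 1))))
          (List.filter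
            (fun i : ℤ => decide (0 ≤ i + (↑d - ((adn.length:ℤ) - 1))) && decide (i + (↑d - ((adn.length:ℤ) - 1)) < (adn.length:ℤ)))
            (List.map (fun k : ℕ => (↑k : ℤ)) (List.range adn.length))))
        = pvW (if adn.length ≤ d+1 then pvUD adn adn.length (d+1-adn.length) else pvLD adn adn.length (adn.length-1-d)) := by
    intro d hd
    rw [Finset.mem_range] at hd
    rw [List.filter_map, List.map_map]
    by_cases hc : adn.length ≤ d+1
    · have ho : ((d:ℤ) - ((adn.length:ℤ) - 1)) = ((d+1-adn.length : ℕ) : ℤ) := by omega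
      simp only [ho]
      have hcond : ∀ i ∈ List.range adn.length,
          ((fun i : ℤ => decide (0 ≤ i + ((d+1-adn.length:ℕ):ℤ)) && decide (i + ((d+1-adn.length:ℕ):ℤ) < (adn.length:ℤ))) ∘ (fun k : ℕ => (↑k:ℤ))) i
            = decide (i < adn.length - (d+1-adn.length)) := by
        intro i hi
        rw [List.mem_range] at hi
        simp only [Function.comp_apply]
        rw [Bool.eq_iff_iff]
        simp only [Bool.and_eq_true, decide_eq_true_eq]
        omega
      rw [List.filter_congr hcond, pvFilter_lt_range,
        show min (adn.length - (d+1-adn.length)) adn.length = adn.length - (d+1-adn.length) from by omega]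
      have hmap : ∀ t ∈ List.range (adn.length - (d+1-adn.length)),
          ((fun i : ℤ => pvGridAt (List.map (fun row => List.take adn.length row.toList) adn) i (i + ((d+1-adn.length:ℕ):ℤ))) ∘ (fun k : ℕ => (↑k:ℤ))) t
            = pvG adn t (t + (d+1-adn.length)) := by
        intro t ht
        rw [List.mem_range] at ht
        simp only [Function.comp_apply]
        rw [show ((t:ℤ) + ((d+1-adn.length:ℕ):ℤ)) = ((t + (d+1-adn.length) : ℕ) : ℤ) from by push_cast; ring]
        exact pvGridAt_G adn pre _ _ (by omega) (by omega)
      rw [List.map_congr_left hmap, pvCountRuns_eq_W, if_pos hc]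
      rfl
    · have ho : ((d:ℤ) - ((adn.length:ℤ) - 1)) = -((adn.length-1-d : ℕ) : ℤ) := by omega
      simp only [ho]
      have hcond : ∀ i ∈ List.range adn.length,
          ((fun i : ℤ => decide (0 ≤ i + -((adn.length-1-d:ℕ):ℤ)) && decide (i + -((adn.length-1-d:ℕ):ℤ) < (adn.length:ℤ))) ∘ (fun k : ℕ => (↑k:ℤ))) i
            = decide (adn.length-1-d ≤ i) := by
        intro i hi
        rw [List.mem_range] at hi
        simp only [Function.comp_apply]
        rw [Bool.eq_iff_iff]
        simp only [Bool.and_eq_true, decide_eq_true_eq]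
        omega
      rw [List.filter_congr hcond, pvFilter_le_range, List.map_map]
      have hmap : ∀ t ∈ List.range (adn.length - (adn.length-1-d)),
          (((fun i : ℤ => pvGridAt (List.map (fun row => List.take adn.length row.toList) adn) i (i + -((adn.length-1-d:ℕ):ℤ))) ∘ (fun k : ℕ => (↑k:ℤ))) ∘ (fun t : ℕ => t + (adn.length-1-d))) t
            = pvG adn (t + (adn.length-1-d)) t := by
        intro t ht
        rw [List.mem_range] at ht
        simp only [Function.comp_apply]
        rw [show (((t + (adn.length-1-d) : ℕ):ℤ) + -((adn.length-1-d:ℕ):ℤ)) = ((t:ℕ):ℤ) from by push_cast; ring]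
        exact pvGridAt_G adn pre _ _ (by omega) (by omega)
      rw [List.map_congr_left hmap, pvCountRuns_eq_W, if_neg hc]
      rfl
  rw [Finset.sum_congr rfl h1, Finset.sum_congr rfl h2, Finset.sum_congr rfl h3,
    pvDiagSplit adn adn.length hn1]
  unfold pvTotal
  ring

lemma B_eq (adn : List String) (pre : Pre_isMutant adn) :
    isMutant_alt adn = decide (pvTotal adn adn.length > 2) := by
  have hn1 : adn = [] ∨ 1 ≤ adn.length := by rcases adn with _ | ⟨r, t⟩ <;> simp
  rcases hn1 with rfl | hn1
  · decide
  have hsum := B_sums adn pre hn1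
  simp only [isMutant_alt]
  rw [pvLoop_spec pvCountRuns pvCountRuns_nonneg _ 0 (by omega)]
  set S1 := ((adn.map (fun row => PySem.List.slice row.toList none (some (adn.length : Int)))).map pvCountRuns).sum with hS1
  set S2 := ((PySem.List.pyRange 0 (adn.length : Int) 1).map (fun j => pvCountRuns
        ((PySem.List.pyRange 0 (adn.length : Int) 1).map
          (fun i => pvGridAt (adn.map (fun row => PySem.List.slice row.toList none (some (adn.length : Int)))) i j)))).sum with hS2
  set S3 := ((PySem.List.pyRange 0 (2*(adn.length : Int)-1) 1).map (fun d =>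
        pvCountRuns (((PySem.List.pyRange 0 (adn.length : Int) 1).filter
          (fun i => decide (0 ≤ i + (d - ((adn.length : Int)-1))) && decide (i + (d - ((adn.length : Int)-1)) < (adn.length : Int)))).map
          (fun i => pvGridAt (adn.map (fun row => PySem.List.slice row.toList none (some (adn.length : Int)))) i (i + (d - ((adn.length : Int)-1))))))).sum with hS3
  have hs1 : 0 ≤ S1 := List.sum_nonneg (by
    rintro y hy; obtain ⟨z, _, rfl⟩ := List.mem_map.mp hy; exact pvCountRuns_nonneg z)
  have hs2 : 0 ≤ S2 := List.sum_nonneg (by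
    rintro y hy; obtain ⟨z, _, rfl⟩ := List.mem_map.mp hy; exact pvCountRuns_nonneg _)
  have hs3 : 0 ≤ S3 := List.sum_nonneg (by
    rintro y hy; obtain ⟨z, _, rfl⟩ := List.mem_map.mp hy; exact pvCountRuns_nonneg _)
  have htot : S1 + S2 + S3 = pvTotal adn adn.length := hsum
  by_cases c1 : (0:ℤ) + S1 > 2
  · rw [if_pos c1]
    show true = decide (pvTotal adn adn.length > 2)
    rw [eq_comm, decide_eq_true_eq]
    omega
  · rw [if_neg c1]
    show (match pvLoop _ (PySem.List.pyRange 0 (adn.length:Int) 1) ((0:ℤ) + S1) with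
      | none => true
      | some t2 => _ : Bool) = _
    rw [pvLoop_spec _ (fun j => pvCountRuns_nonneg _) _ _ (by omega)]
    by_cases c2 : (0:ℤ) + S1 + S2 > 2
    · rw [if_pos c2]
      show true = decide (pvTotal adn adn.length > 2)
      rw [eq_comm, decide_eq_true_eq]
      omega
    · rw [if_neg c2]
      show (match pvLoop _ (PySem.List.pyRange 0 (2*(adn.length:Int)-1) 1) ((0:ℤ) + S1 + S2) with
        | none => true
        | some t3 => decide (t3 > 2) : Bool) = _
      rw [pvLoop_spec _ (fun d => pvCountRuns_nonneg _) _ _ (by omega)]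
      by_cases c3 : (0:ℤ) + S1 + S2 + S3 > 2
      · rw [if_pos c3]
        show true = decide (pvTotal adn adn.length > 2)
        rw [eq_comm, decide_eq_true_eq]
        omega
      · rw [if_neg c3]
        show decide ((0:ℤ) + S1 + S2 + S3 > 2) = decide (pvTotal adn adn.length > 2)
        rw [decide_eq_decide]
        omega

-- ===== VERDICT (by name: the statement is the Claim_ definition above) =====
theorem isMutant_spec : Claim_equal_isMutant := by
  intro adn _ pre
  show isMutant adn = isMutant_alt adn
  rw [A_eq, B_eq adn pre, pvCA_regroup adn adn.length]
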